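-- pv_equiv track=rewrite | github.com/LGM-233/model | textrank/文本摘要_att.py | file_abstr
-- ===== SOURCE A (Python) =====
-- def file_abstr(index,doc):
--     doc_list = doc.split(',')
--     # 分割数组
--     step = 256
--     split_arrays = []
--     for i in range(0,len(doc_list),step):
--         if i + step < len(doc_list):
--             split_arrays.append(doc_list[i:i+step])
--         else:
--             split_arrays.append(doc_list[i:len(doc_list)])
--
--     doc_end = []
--
--     for i in range(len(split_arrays)):
--         if i in index:
--             doc_end.append(split_arrays[i])
--         else:
--             continue
--     # 使用列表推导式和 join 方法将整数合并为一句字符串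
--     result = ",".join(num for sublist in doc_end for num in sublist)
--
--     return result
-- ===== SOURCE B (Python) =====
-- def file_abstr(index, doc):
--     wanted = set(index)
--     return ",".join(x for pos, x in enumerate(doc.split(',')) if pos // 256 in wanted)
-- ===== Notes on version B (the rewrite author's own statement) =====
-- stated objective: simpler
-- what changed: Replaced A's three-stage pipeline (materialise a list of 256-element chunks, select chunks by membership of their index, flatten and join) by a single flat pass over the split elements that keeps an element iff its position // 256 is in the index set.
import Mathlib
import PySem

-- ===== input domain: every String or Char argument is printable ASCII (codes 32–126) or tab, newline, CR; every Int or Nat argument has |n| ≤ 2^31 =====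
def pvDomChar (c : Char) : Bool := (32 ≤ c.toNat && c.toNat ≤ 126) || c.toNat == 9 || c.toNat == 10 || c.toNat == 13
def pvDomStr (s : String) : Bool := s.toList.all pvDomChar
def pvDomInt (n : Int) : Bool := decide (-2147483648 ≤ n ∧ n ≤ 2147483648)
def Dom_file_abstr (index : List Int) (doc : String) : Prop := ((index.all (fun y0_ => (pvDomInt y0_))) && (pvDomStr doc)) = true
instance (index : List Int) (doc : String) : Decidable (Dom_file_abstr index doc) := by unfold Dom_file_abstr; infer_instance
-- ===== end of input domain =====

-- B replaces A's build-chunks / select-chunks / flatten pipeline by one flat pass that keeps an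
-- element at position pos iff pos // 256 is in the index set (objective: simpler decomposition).

-- ===== PORT A =====
def file_abstr (index : List Int) (doc : String) : String :=
  let doc_list := (PySem.Str.split? doc ",").getD []   -- sep is the literal "," ≠ "", so split? is always some: exact
  let step : Int := 256
  let split_arrays : List (List String) :=
    (PySem.List.pyRange 0 ((doc_list.length : Int)) step).foldl
      (fun acc i =>
        if i + step < (doc_list.length : Int) then
          acc ++ [PySem.List.slice doc_list (some i) (some (i + step))]
        else
          acc ++ [PySem.List.slice doc_list (some i) (some ((doc_list.length : Int)))]) []
  let doc_end : List (List String) :=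
    (PySem.List.pyRange 0 ((split_arrays.length : Int)) 1).foldl
      (fun acc i => if i ∈ index then acc ++ [PySem.List.pyGetD split_arrays i []] else acc) []
  PySem.Str.join "," (doc_end.foldl (fun acc sublist => acc ++ sublist) [])

-- ===== PORT B =====
def file_abstr_alt (index : List Int) (doc : String) : String :=
  let wanted : PySem.Set Int := PySem.Set.ofList index
  PySem.Str.join ","
    (((PySem.List.enumerate ((PySem.Str.split? doc ",").getD [])).filter
        (fun p => decide (PySem.Int.floordiv p.1 256 ∈ wanted))).map (·.2))

-- ===== PRECONDITION & SPEC =====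
def Spec_file_abstr (index : List Int) (doc : String) (out : String) : Prop := out = file_abstr_alt index doc
instance (index : List Int) (doc : String) (out : String) : Decidable (Spec_file_abstr index doc out) := by unfold Spec_file_abstr; infer_instance

-- ===== CLAIM (what is proved, stated in full; the proofs are below) =====
def Claim_equal_file_abstr : Prop := ∀ (index : List Int) (doc : String), Dom_file_abstr index doc → Spec_file_abstr index doc (file_abstr index doc)

-- ===== LEMMAS AND PROOFS =====

-- the chunks of 256 that A's first loop builds
def chunksOf (l : List String) : List (List String) :=
  if l = [] then [] else l.take 256 :: chunksOf (l.drop 256)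
termination_by l.length
decreasing_by
  rename_i h
  have : l.length ≠ 0 := fun hl => h (List.eq_nil_of_length_eq_zero hl)
  simp only [List.length_drop]; omega

-- common intermediate: the selected chunks flattened, chunk numbering starting at c
def selC (index : List Int) : List (List String) → Int → List String
  | [], _ => []
  | ch :: t, c => (if c ∈ index then ch else []) ++ selC index t (c + 1)

theorem chunksOf_eq_map_range (L : List String) :
    chunksOf L = (List.range ((L.length + 255) / 256)).map (fun k => (L.drop (256 * k)).take 256) := by
  by_cases h : L = []
  · subst h; simp [chunksOf]
  · rw [chunksOf, if_neg h, chunksOf_eq_map_range (L.drop 256)]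
    have hm : (L.length + 255) / 256 = ((L.drop 256).length + 255) / 256 + 1 := by
      have : L.length ≠ 0 := fun hl => h (List.eq_nil_of_length_eq_zero hl)
      simp only [List.length_drop]; omega
    rw [hm, List.range_succ_eq_map]
    simp only [List.map_cons, List.map_map, Nat.mul_zero, List.drop_zero]
    refine congrArg _ ?_
    apply List.map_congr_left
    intro k _
    simp only [Function.comp_apply, List.drop_drop]
    congr 2
    omega
termination_by L.length
decreasing_by
  have : L.length ≠ 0 := fun hl => h (List.eq_nil_of_length_eq_zero hl)
  simp only [List.length_drop]; omega

-- A's first loop builds exactly chunksOf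
theorem split_arrays_eq (L : List String) :
    ((PySem.List.pyRange 0 ((L.length : Int)) 256).foldl
      (fun acc i =>
        if i + 256 < (L.length : Int) then
          acc ++ [PySem.List.slice L (some i) (some (i + 256))]
        else
          acc ++ [PySem.List.slice L (some i) (some ((L.length : Int)))]) [])
    = chunksOf L := by
  rw [PySem.List.foldl_congr_mem (g := fun acc i => acc ++ [(L.drop i.toNat).take 256])]
  · rw [PySem.List.foldl_append_singleton_eq_map, List.nil_append,
      chunksOf_eq_map_range, PySem.List.pyRange_of_pos 0 (L.length : Int) (by omega),
      List.map_map]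
    have hm : (if (0:Int) < (L.length : Int) then (((L.length : Int) - 0 + 256 - 1) / 256).toNat else 0)
        = (L.length + 255) / 256 := by split_ifs <;> omega
    rw [hm]
    apply List.map_congr_left
    intro k _
    simp only [Function.comp_apply]
    congr 2
    omega
  · intro acc i hi
    rw [PySem.List.mem_pyRange_iff_of_pos (by omega)] at hi
    obtain ⟨h0, hn, -⟩ := hi
    split_ifs with hlt
    · rw [PySem.List.slice_toNat L h0 (by omega)]
      have h256 : (i + 256).toNat - i.toNat = 256 := by omega
      rw [h256]
    · rw [PySem.List.slice_toNat L h0 (by omega)]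
      have hdl : (L.drop i.toNat).length = (L.length : Int).toNat - i.toNat := by
        rw [List.length_drop]; omega
      rw [List.take_of_length_le (by omega), List.take_of_length_le (by omega)]

-- A's second loop, flattened, is selC over the chunk list
theorem selA (index : List Int) (C : List (List String)) (c : Int) :
    ((((PySem.List.pyRange c (c + (C.length : Int)) 1).filter (fun i => decide (i ∈ index))).map
        (fun i => PySem.List.pyGetD C (i - c) [])).flatten) = selC index C c := by
  induction C generalizing c with
  | nil => simp [PySem.List.pyRange_one_eq_nil (le_refl c), selC]
  | cons ch t ih =>
    have hcons : PySem.List.pyRange c (c + ((ch :: t).length : Int)) 1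
        = c :: PySem.List.pyRange (c + 1) (c + ((ch :: t).length : Int)) 1 := by
      apply PySem.List.pyRange_one_cons
      simp
    rw [hcons, List.filter_cons]
    have htail : ((PySem.List.pyRange (c + 1) (c + ((ch :: t).length : Int)) 1).filter
          (fun i => decide (i ∈ index))).map (fun i => PySem.List.pyGetD (ch :: t) (i - c) [])
        = ((PySem.List.pyRange (c + 1) ((c + 1) + (t.length : Int)) 1).filter
          (fun i => decide (i ∈ index))).map (fun i => PySem.List.pyGetD t (i - (c + 1)) []) := by
      have hb : c + ((ch :: t).length : Int) = (c + 1) + (t.length : Int) := by simp; omega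
      rw [hb]
      apply List.map_congr_left
      intro i hi
      have hi' : c + 1 ≤ i := (PySem.List.mem_pyRange_one.mp (List.mem_of_mem_filter hi)).1
      rw [PySem.List.pyGetD_of_nonneg _ _ (by omega), PySem.List.pyGetD_of_nonneg _ _ (by omega)]
      have hidx : (i - c).toNat = (i - (c + 1)).toNat + 1 := by omega
      rw [hidx]
      rfl
    by_cases hc : c ∈ index
    · rw [if_pos (by simpa using hc)]
      simp only [List.map_cons, List.flatten_cons, htail, ih (c + 1), selC, if_pos hc]
      congr 1
      rw [PySem.List.pyGetD_of_nonneg _ _ (by omega)]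
      simp
    · rw [if_neg (by simpa using hc)]
      simp only [htail, ih (c + 1), selC, if_neg hc, List.nil_append]

-- B's flat filter pass is the same selC
theorem selB (index : List Int) (L : List String) (c : Nat) :
    (((PySem.List.enumerate L (256 * (c : Int))).filter
        (fun p => decide (PySem.Int.floordiv p.1 256 ∈ index))).map (·.2))
    = selC index (chunksOf L) (c : Int) := by
  by_cases h : L = []
  · subst h; simp [chunksOf, selC, PySem.List.enumerate]
  · rw [chunksOf, if_neg h, selC]
    conv_lhs => rw [← List.take_append_drop 256 L]
    rw [PySem.List.enumerate_append, List.filter_append, List.map_append]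
    congr 1
    · -- the first (up to) 256 positions all have chunk index c
      rw [List.filter_congr (q := fun _ => decide ((c : Int) ∈ index)) ?_]
      · by_cases hc : (c : Int) ∈ index
        · simp [hc, PySem.List.map_snd_enumerate]
        · simp [hc]
      · intro p hp
        rw [PySem.List.mem_enumerate_iff] at hp
        obtain ⟨k, hk, rfl⟩ := hp
        have hk' : k < 256 := by
          have := List.length_take_le 256 L
          omega
        have hfd : PySem.Int.floordiv (256 * (c : Int) + (k : Int)) 256 = (c : Int) := by
          rw [PySem.Int.floordiv_eq_iff_of_pos (by omega)]
          constructor <;> omega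
        simp only [hfd]
    · by_cases hlen : L.length ≤ 256
      · rw [List.drop_eq_nil_of_le hlen]
        simp [chunksOf, selC, PySem.List.enumerate]
      · have hstart : 256 * (c : Int) + ((L.take 256).length : Int) = 256 * ((c + 1 : Nat) : Int) := by
          rw [List.length_take]
          push_cast
          omega
        rw [hstart, selB index (L.drop 256) (c + 1)]
        push_cast
        rfl
termination_by L.length
decreasing_by
  have : L.length ≠ 0 := fun hl => h (List.eq_nil_of_length_eq_zero hl)
  simp only [List.length_drop]; omega

-- ===== VERDICT (by name: the statement is the Claim_ definition above) =====
theorem file_abstr_spec : Claim_equal_file_abstr := by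
  intro index doc _
  unfold Spec_file_abstr file_abstr file_abstr_alt
  simp only
  rw [split_arrays_eq]
  rw [PySem.List.foldl_append_eq_flatten]
  rw [PySem.List.foldl_append_ite (p := fun i => i ∈ index)
      (f := fun i => PySem.List.pyGetD (chunksOf ((PySem.Str.split? doc ",").getD [])) i [])]
  have hA := selA index (chunksOf ((PySem.Str.split? doc ",").getD [])) 0
  simp only [zero_add, sub_zero] at hA
  have hB := selB index ((PySem.Str.split? doc ",").getD []) 0
  simp only [Nat.cast_zero, mul_zero] at hB
  rw [List.nil_append, List.nil_append, hA, ← hB]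
  simp only [PySem.Set.mem_ofList]
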